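-- pv_equiv track=rewrite | github.com/changpil/pyPractice | 2. Coding Interviews/Sessions/String/problems/MoveAllLettersToLeftSideWithMinimizingMemoryWrites.py | move_letters_to_left_side_with_minimizing_memory_writes
-- ===== SOURCE A (Python) =====
-- def move_letters_to_left_side_with_minimizing_memory_writes(s):
--     allLetters = -1
--     i = 0
--     ss = list(s)
--     while i < len(s):
--         if 'a' <= ss[i] <= 'z' or 'A' <= ss[i] <= 'Z':
--             allLetters += 1
--             ss[allLetters] = ss[i]
--         i += 1
--
--     return "".join(ss)
-- ===== SOURCE B (Python) =====
-- def move_letters_to_left_side_with_minimizing_memory_writes(s):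
--     letters = [c for c in s if 'a' <= c <= 'z' or 'A' <= c <= 'Z']
--     return "".join(letters) + s[len(letters):]
-- ===== Notes on version B (the rewrite author's own statement) =====
-- stated objective: simpler
-- what changed: Replaces the in-place two-pointer write-compaction over a mutable char list by a direct filter of the letters concatenated with the untouched original suffix of length len(s)-len(letters); avoids per-character index bookkeeping and list mutation.
import Mathlib
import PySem

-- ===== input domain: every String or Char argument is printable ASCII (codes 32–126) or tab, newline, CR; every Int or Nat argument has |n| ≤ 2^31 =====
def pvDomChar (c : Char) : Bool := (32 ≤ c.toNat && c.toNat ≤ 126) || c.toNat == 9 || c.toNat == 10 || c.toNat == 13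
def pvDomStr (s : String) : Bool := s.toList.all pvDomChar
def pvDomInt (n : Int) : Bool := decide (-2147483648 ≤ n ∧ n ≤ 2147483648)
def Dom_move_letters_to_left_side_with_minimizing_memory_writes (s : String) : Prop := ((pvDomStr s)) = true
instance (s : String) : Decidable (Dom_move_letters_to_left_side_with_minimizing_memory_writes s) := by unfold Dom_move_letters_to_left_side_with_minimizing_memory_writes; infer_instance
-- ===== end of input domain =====

-- B replaces A's in-place two-pointer write-compaction by filter-the-letters ++ the untouched
-- original suffix; same O(n) cost, simpler decomposition (objective: simpler).

-- ===== PORT A =====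
-- the letter test 'a' <= c <= 'z' or 'A' <= c <= 'Z' (shared by both Pythons verbatim)
def pvIsLetter (c : Char) : Bool :=
  ('a' ≤ c && c ≤ 'z') || ('A' ≤ c && c ≤ 'Z')

-- the while loop: i scans, allLetters is the last written index (starts at -1), ss mutates in place
def pvLoopA (n : Nat) (i : Nat) (allLetters : Int) (ss : List Char) : List Char :=
  if _h : i < n then
    let c := PySem.List.pyGetD ss (i : Int) ' '   -- ss[i]; always in range since len(ss) = len(s) = n
    if pvIsLetter c then
      pvLoopA n (i + 1) (allLetters + 1) (PySem.List.pySetD ss (allLetters + 1) c)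
    else
      pvLoopA n (i + 1) allLetters ss
  else ss
termination_by n - i

def move_letters_to_left_side_with_minimizing_memory_writes (s : String) : String :=
  String.mk (pvLoopA s.toList.length 0 (-1) s.toList)   -- "".join(ss)

-- ===== PORT B =====
def move_letters_to_left_side_with_minimizing_memory_writes_alt (s : String) : String :=
  let letters := s.toList.filter pvIsLetter
  String.mk (letters ++ s.toList.drop letters.length)   -- "".join(letters) + s[len(letters):]

-- ===== PRECONDITION & SPEC =====
def Spec_move_letters_to_left_side_with_minimizing_memory_writes (s : String) (out : String) : Prop := out = move_letters_to_left_side_with_minimizing_memory_writes_alt s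
instance (s : String) (out : String) : Decidable (Spec_move_letters_to_left_side_with_minimizing_memory_writes s out) := by unfold Spec_move_letters_to_left_side_with_minimizing_memory_writes; infer_instance

-- ===== CLAIM (what is proved, stated in full; the proofs are below) =====
def Claim_equal_move_letters_to_left_side_with_minimizing_memory_writes : Prop := ∀ (s : String), Dom_move_letters_to_left_side_with_minimizing_memory_writes s → Spec_move_letters_to_left_side_with_minimizing_memory_writes s (move_letters_to_left_side_with_minimizing_memory_writes s)

-- ===== LEMMAS AND PROOFS =====

-- filter of a take never gets longer than the take
theorem pv_filter_take_le (t : List Char) (i : Nat) :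
    ((t.take i).filter pvIsLetter).length ≤ i := by
  calc ((t.take i).filter pvIsLetter).length ≤ (t.take i).length := List.length_filter_le _ _
    _ ≤ i := by simp [List.length_take]

-- loop invariant: with L the letters of the first i characters, ss = L ++ (original tail from L.length on)
theorem pvLoopA_inv (t : List Char) (i : Nat) (hi : i ≤ t.length) :
    pvLoopA t.length i (((((t.take i).filter pvIsLetter).length : Int)) - 1)
        ((t.take i).filter pvIsLetter ++ t.drop ((t.take i).filter pvIsLetter).length)
      = t.filter pvIsLetter ++ t.drop (t.filter pvIsLetter).length := by
  induction hfuel : t.length - i generalizing i with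
  | zero =>
    have hieq : i = t.length := by omega
    subst hieq
    rw [pvLoopA]
    simp
  | succ n ih =>
    have hlt : i < t.length := by omega
    set L := (t.take i).filter pvIsLetter with hL
    have hLlen : L.length ≤ i := pv_filter_take_le t i
    -- ss[i] = t[i]
    have hget : PySem.List.pyGetD (L ++ t.drop L.length) (i : Int) ' ' = t[i] := by
      have hidx : (L ++ t.drop L.length)[i]? = some t[i] := by
        rw [List.getElem?_append_right hLlen, List.getElem?_drop]
        have h2 : L.length + (i - L.length) = i := by omega
        rw [h2, List.getElem?_eq_getElem hlt]
      rw [PySem.List.pyGetD_natCast, List.getD_eq_getElem?_getD, hidx]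
      rfl
    have htake : t.take (i + 1) = t.take i ++ [t[i]] := by
      rw [List.take_succ, List.getElem?_eq_getElem hlt]; rfl
    rw [pvLoopA]
    simp only [hlt, dif_pos, hget]
    by_cases hc : pvIsLetter t[i]
    · -- letter: write t[i] at position L.length
      rw [if_pos hc]
      have hL1 : (t.take (i+1)).filter pvIsLetter = L ++ [t[i]] := by
        rw [htake, List.filter_append]; simp [hc, hL]
      have hcast : ((L.length : Int) - 1) + 1 = ((L.length : Nat) : Int) := by omega
      rw [hcast, PySem.List.pySetD_natCast]
      have hdrop : t.drop L.length = t[L.length] :: t.drop (L.length + 1) := by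
        rw [List.drop_eq_getElem_cons (by omega)]
      have hset : (L ++ t.drop L.length).set L.length t[i]
          = (L ++ [t[i]]) ++ t.drop (L.length + 1) := by
        rw [List.set_append_right _ _ (le_refl _), Nat.sub_self, hdrop, List.set_cons_zero,
            List.append_assoc, List.singleton_append]
      rw [hset]
      have := ih (i + 1) (by omega) (by omega)
      rw [hL1] at this
      have hlen : (((L ++ [t[i]]).length : Nat) : Int) - 1 = ((L.length : Nat) : Int) := by
        simp
      have hlen2 : (L ++ [t[i]]).length = L.length + 1 := by simp
      rw [hlen, hlen2] at this
      exact this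
    · -- not a letter: nothing changes
      rw [if_neg hc]
      have hL1 : (t.take (i+1)).filter pvIsLetter = L := by
        rw [htake, List.filter_append]; simp [hc, hL]
      have := ih (i + 1) (by omega) (by omega)
      rw [hL1] at this
      exact this

-- ===== VERDICT (by name: the statement is the Claim_ definition above) =====
theorem move_letters_to_left_side_with_minimizing_memory_writes_spec : Claim_equal_move_letters_to_left_side_with_minimizing_memory_writes := by
  intro s _
  unfold Spec_move_letters_to_left_side_with_minimizing_memory_writes
  unfold move_letters_to_left_side_with_minimizing_memory_writes
  unfold move_letters_to_left_side_with_minimizing_memory_writes_alt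
  have := pvLoopA_inv s.toList 0 (Nat.zero_le _)
  simp only [List.take_zero, List.filter_nil, List.length_nil, List.drop_zero,
    List.nil_append, Nat.cast_zero] at this
  rw [show ((0 : Int) - 1) = -1 by omega] at this
  rw [this]
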